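-- pv_equiv track=rewrite | github.com/TheAlgorithms/Python | maths/kadanes_algorithm.py | negative_exist
-- ===== SOURCE A (Python) =====
-- def negative_exist(arr):
--
--     """
--       >>> negative_exist([-2,-8,-9])
--       -2
--     """
--     max=arr[0]
--     for i in arr:
--         if(i>=0):
--             return 0;
--         elif(max<=i):
--             max=i
--     return max
-- ===== SOURCE B (Python) =====
-- def negative_exist(arr):
--     # staged: first decide whether any element is non-negative, then (only in the
--     # all-negative case) take the maximum with the builtin
--     if any(x >= 0 for x in arr):
--         return 0
--     return max(arr)
-- ===== Notes on version B (the rewrite author's own statement) =====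
-- stated objective: idiomatic
-- what changed: B is two staged passes built from builtins - any() to decide whether a non-negative element exists, then max() for the all-negative case - instead of A's single hand-written scan with a running max and an early return.
import Mathlib
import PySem

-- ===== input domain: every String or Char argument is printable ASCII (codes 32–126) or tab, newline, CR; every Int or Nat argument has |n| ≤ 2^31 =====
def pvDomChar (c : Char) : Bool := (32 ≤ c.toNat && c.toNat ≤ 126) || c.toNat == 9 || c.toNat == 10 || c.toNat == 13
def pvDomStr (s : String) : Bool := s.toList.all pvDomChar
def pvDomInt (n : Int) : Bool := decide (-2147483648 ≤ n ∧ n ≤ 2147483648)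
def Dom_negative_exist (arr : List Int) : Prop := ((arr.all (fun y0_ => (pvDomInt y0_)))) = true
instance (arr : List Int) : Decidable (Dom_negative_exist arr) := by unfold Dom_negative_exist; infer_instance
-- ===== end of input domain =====

-- B decides "some element is non-negative" with a standalone any-pass and otherwise takes max(arr) with the builtin, instead of A's hand-written running-max scan with early return; objective: idiomatic.


-- ===== PORT A =====
-- loop over all of arr with the running `max`; early `return 0` on a non-negative element
def pvLoopA (m : Int) : List Int → Int
  | [] => m
  | i :: t => if i ≥ 0 then 0 else if m ≤ i then pvLoopA i t else pvLoopA m t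

def negative_exist (arr : List Int) : Int :=
  match arr with
  | [] => 0            -- Python raises IndexError on arr[0]; excluded by Pre_
  | h :: _ => pvLoopA h arr

-- ===== PORT B =====
def negative_exist_alt (arr : List Int) : Int :=
  if arr.any (fun x => decide (x ≥ 0)) then 0
  else
    match PySem.List.max? arr (fun y => y) with
    | some m => m
    | none => 0        -- Python's max([]) raises ValueError; excluded by Pre_

-- ===== PRECONDITION & SPEC =====
-- Pre_ excludes only the empty list, on which A raises IndexError (arr[0]).
def Pre_negative_exist (arr : List Int) : Prop := arr ≠ []
instance (arr : List Int) : Decidable (Pre_negative_exist arr) := by unfold Pre_negative_exist; infer_instance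
def pvWitness_negative_exist : List Int := ([-2, -8, -9])

def Spec_negative_exist (arr : List Int) (out : Int) : Prop := out = negative_exist_alt arr
instance (arr : List Int) (out : Int) : Decidable (Spec_negative_exist arr out) := by unfold Spec_negative_exist; infer_instance

-- ===== CLAIM (what is proved, stated in full; the proofs are below) =====
def Claim_equal_negative_exist : Prop := ∀ (arr : List Int), Dom_negative_exist arr → Pre_negative_exist arr → Spec_negative_exist arr (negative_exist arr)

-- ===== LEMMAS AND PROOFS =====
-- A's loop equals: 0 if some element of l is ≥ 0, else the running max of l over seed m
theorem pv_loopA_eq (l : List Int) (m : Int) :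
    pvLoopA m l = if ∃ x ∈ l, x ≥ 0 then 0 else l.foldl max m := by
  induction l generalizing m with
  | nil => simp [pvLoopA]
  | cons i t ih =>
    by_cases hi : i ≥ 0
    · rw [show pvLoopA m (i :: t) = 0 from by simp [pvLoopA, hi],
        if_pos ⟨i, List.mem_cons_self, hi⟩]
    · have h1 : ((∃ x, (x = i ∨ x ∈ t) ∧ x ≥ 0) ↔ ∃ x ∈ t, x ≥ 0) := by
        constructor
        · rintro ⟨x, hx | hx, hx0⟩
          · subst hx; omega
          · exact ⟨x, hx, hx0⟩
        · rintro ⟨x, hx, hx0⟩; exact ⟨x, Or.inr hx, hx0⟩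
      have hstep : (if m ≤ i then pvLoopA i t else pvLoopA m t) = pvLoopA (max m i) t := by
        by_cases hmi : m ≤ i
        · rw [if_pos hmi, max_eq_right hmi]
        · rw [if_neg hmi, max_eq_left (by omega)]
      rw [show pvLoopA m (i :: t) = pvLoopA (max m i) t from by
        rw [← hstep]; simp [pvLoopA, hi], ih]
      simp only [List.foldl_cons, List.mem_cons, h1]

theorem negative_exist_spec : Claim_equal_negative_exist := by
  intro arr _ hpre
  unfold Spec_negative_exist negative_exist negative_exist_alt
  match arr with
  | [] => exact absurd rfl hpre
  | h :: t =>
    show pvLoopA h (h :: t) = _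
    rw [pv_loopA_eq, PySem.List.max?_id_cons]
    have hiff : (∃ x ∈ h :: t, x ≥ 0) ↔ ((h :: t).any (fun x => decide (x ≥ 0)) = true) := by
      simp
    by_cases hex : ∃ x ∈ h :: t, x ≥ 0
    · rw [if_pos hex, if_pos (hiff.mp hex)]
    · rw [if_neg hex, if_neg (fun hb => hex (hiff.mpr hb))]
      simp [max_self]
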